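-- pv_equiv track=rewrite | github.com/MirRinat/Sf_education | Homework4/Loops_To_Fill.py | exampleFour
-- ===== SOURCE A (Python) =====
-- def exampleFour(array, num):
--     myarray = []
--     for i in array:
--         if str(i).isdigit:
--             if i == 7 or i == 12:
--                 break
--             if i % num == 0:
--                 myarray.append(str(i))
--     return myarray
-- ===== SOURCE B (Python) =====
-- def exampleFour(array, num):
--     # Stage 1: locate the cut position = first occurrence of a sentinel (7 or 12),
--     # via membership + index search; len(array) if no sentinel occurs.
--     cut = len(array)
--     for s in (7, 12):
--         if s in array:
--             cut = min(cut, array.index(s))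
--     # Stage 2: slice off the prefix, then filter multiples and stringify.
--     return [str(i) for i in array[:cut] if i % num == 0]
-- ===== Notes on version B (the rewrite author's own statement) =====
-- stated objective: alternative
-- what changed: Instead of a single pass that breaks at 7/12 while appending, B stages the work: it first computes the cut position as the minimum index of the sentinels 7 and 12 (len if absent), slices array[:cut], and only then filters multiples of num and stringifies them.
import Mathlib
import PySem

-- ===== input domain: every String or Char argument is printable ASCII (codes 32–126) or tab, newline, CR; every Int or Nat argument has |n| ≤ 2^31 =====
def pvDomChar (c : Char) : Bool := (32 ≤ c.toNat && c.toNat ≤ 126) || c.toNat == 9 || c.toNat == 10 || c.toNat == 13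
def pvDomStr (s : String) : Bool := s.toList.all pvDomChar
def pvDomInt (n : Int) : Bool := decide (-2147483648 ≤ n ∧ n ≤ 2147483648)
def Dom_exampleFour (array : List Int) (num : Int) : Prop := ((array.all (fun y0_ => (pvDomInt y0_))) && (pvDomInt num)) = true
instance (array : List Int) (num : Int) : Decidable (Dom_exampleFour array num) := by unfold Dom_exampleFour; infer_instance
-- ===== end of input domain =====

-- B replaces the single break-loop by staged passes: find the sentinel cut index, slice the prefix, then filter/map (alternative decomposition).

-- ===== PORT A =====
-- the loop: accumulator myarray, break on 7 or 12; 'str(i).isdigit' is a truthy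
-- bound method in Python, so that guard is always taken (ported as always-true).
def exampleFourLoop (num : Int) (myarray : List String) : List Int → List String
  | [] => myarray
  | i :: rest =>
    if i = 7 ∨ i = 12 then myarray
    else if PySem.Int.mod i num = 0 then exampleFourLoop num (myarray ++ [PySem.Int.toStr i]) rest
    else exampleFourLoop num myarray rest

def exampleFour (array : List Int) (num : Int) : List String :=
  exampleFourLoop num [] array

-- ===== PORT B =====
-- cut = len(array); for s in (7,12): if s in array: cut = min(cut, array.index(s))
def exampleFourCut (array : List Int) : Int :=
  [(7 : Int), (12 : Int)].foldl
    (fun cut s =>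
      if array.contains s then
        min cut (((PySem.List.index? array s).getD 0 : Nat) : Int)
      else cut)
    (array.length : Int)

-- [str(i) for i in array[:cut] if i % num == 0]
def exampleFour_alt (array : List Int) (num : Int) : List String :=
  ((PySem.List.slice array none (some (exampleFourCut array))).filter
      (fun i => PySem.Int.mod i num == 0)).map PySem.Int.toStr

-- ===== PRECONDITION & SPEC =====
-- Pre_ excludes exactly the inputs where A raises ZeroDivisionError: num = 0 with a
-- non-7/12 element before the first 7/12 (both programs raise there).
def Pre_exampleFour (array : List Int) (num : Int) : Prop :=
  num ≠ 0 ∨ array.takeWhile (fun x => !(x == 7) && !(x == 12)) = []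
instance (array : List Int) (num : Int) : Decidable (Pre_exampleFour array num) := by
  unfold Pre_exampleFour; infer_instance

def pvWitness_exampleFour : List Int × Int := ([3, 6, 7, 9], 3)

def Spec_exampleFour (array : List Int) (num : Int) (out : List String) : Prop := out = exampleFour_alt array num
instance (array : List Int) (num : Int) (out : List String) : Decidable (Spec_exampleFour array num out) := by unfold Spec_exampleFour; infer_instance

-- ===== CLAIM (what is proved, stated in full; the proofs are below) =====
def Claim_equal_exampleFour : Prop := ∀ (array : List Int) (num : Int), Dom_exampleFour array num → Pre_exampleFour array num → Spec_exampleFour array num (exampleFour array num)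

-- ===== LEMMAS AND PROOFS =====
-- A's loop collects the filtered, stringified takeWhile-prefix.
theorem exampleFourLoop_eq (num : Int) (array : List Int) (acc : List String) :
    exampleFourLoop num acc array =
      acc ++ ((array.takeWhile (fun x => !(x == 7) && !(x == 12))).filter
        (fun i => PySem.Int.mod i num == 0)).map PySem.Int.toStr := by
  induction array generalizing acc with
  | nil => simp [exampleFourLoop]
  | cons i rest ih =>
    by_cases h7 : i = 7 ∨ i = 12
    · have : (!(i == 7) && !(i == 12)) = false := by
        rcases h7 with h | h <;> simp [h]
      simp [exampleFourLoop, h7, List.takeWhile, this]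
    · have hni : ¬ i = 7 ∧ ¬ i = 12 := by tauto
      have h7' : (!(i == 7) && !(i == 12)) = true := by simp [hni.1, hni.2]
      by_cases hm : PySem.Int.mod i num = 0
      · simp [exampleFourLoop, h7, hm, List.takeWhile, h7', ih]
      · simp [exampleFourLoop, h7, hm, List.takeWhile, h7', ih]

-- B's cut index is the first position holding a sentinel (7 or 12), array length if none.
theorem exampleFourCut_eq (l : List Int) :
    exampleFourCut l = ((l.findIdx (fun x => x == 7 || x == 12) : Nat) : Int) := by
  unfold exampleFourCut
  simp only [List.foldl]
  by_cases m7 : (7 : Int) ∈ l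
  · rcases h7 : PySem.List.index? l 7 with _ | k7
    · exact absurd ((PySem.List.index?_eq_none_iff l 7).mp h7) (by simpa using m7)
    · obtain ⟨hk7, hget7, hmin7⟩ := PySem.List.getElem_of_index?_eq_some h7
      by_cases m12 : (12 : Int) ∈ l
      · rcases h12 : PySem.List.index? l 12 with _ | k12
        · exact absurd ((PySem.List.index?_eq_none_iff l 12).mp h12) (by simpa using m12)
        · obtain ⟨hk12, hget12, hmin12⟩ := PySem.List.getElem_of_index?_eq_some h12
          have hfind : l.findIdx (fun x => x == 7 || x == 12) = min k7 k12 := by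
            rcases le_total k7 k12 with hle | hle
            · rw [Nat.min_eq_left hle, List.findIdx_eq hk7]
              refine ⟨by simp [hget7], fun j hj => ?_⟩
              have := hmin7 j hj
              have := hmin12 j (lt_of_lt_of_le hj hle)
              simp_all
            · rw [Nat.min_eq_right hle, List.findIdx_eq hk12]
              refine ⟨by simp [hget12], fun j hj => ?_⟩
              have := hmin12 j hj
              have := hmin7 j (lt_of_lt_of_le hj hle)
              simp_all
          simp [m7, m12, hfind]
          omega
      · have hfind : l.findIdx (fun x => x == 7 || x == 12) = k7 := by
          rw [List.findIdx_eq hk7]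
          refine ⟨by simp [hget7], fun j hj => ?_⟩
          have := hmin7 j hj
          have : l[j] ≠ 12 := fun he => m12 (he ▸ List.getElem_mem _)
          simp_all
        simp [m7, m12, hfind]
        omega
  · by_cases m12 : (12 : Int) ∈ l
    · rcases h12 : PySem.List.index? l 12 with _ | k12
      · exact absurd ((PySem.List.index?_eq_none_iff l 12).mp h12) (by simpa using m12)
      · obtain ⟨hk12, hget12, hmin12⟩ := PySem.List.getElem_of_index?_eq_some h12
        have hfind : l.findIdx (fun x => x == 7 || x == 12) = k12 := by
          rw [List.findIdx_eq hk12]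
          refine ⟨by simp [hget12], fun j hj => ?_⟩
          have := hmin12 j hj
          have : l[j] ≠ 7 := fun he => m7 (he ▸ List.getElem_mem _)
          simp_all
        simp [m7, m12, hfind]
        omega
    · have hfind : l.findIdx (fun x => x == 7 || x == 12) = l.length :=
        List.findIdx_eq_length.mpr (fun x hx => by
          have : x ≠ 7 := fun he => m7 (he ▸ hx)
          have : x ≠ 12 := fun he => m12 (he ▸ hx)
          simp_all)
      simp [m7, m12, hfind]

-- B's slice is exactly the takeWhile-prefix.
theorem exampleFour_alt_eq (array : List Int) (num : Int) :
    exampleFour_alt array num =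
      ((array.takeWhile (fun x => !(x == 7) && !(x == 12))).filter
        (fun i => PySem.Int.mod i num == 0)).map PySem.Int.toStr := by
  unfold exampleFour_alt
  rw [exampleFourCut_eq, PySem.List.slice_to array (by positivity)]
  have hq : (fun x : Int => !(!(x == 7) && !(x == 12))) = (fun x : Int => x == 7 || x == 12) := by
    funext x; simp
  rw [List.takeWhile_eq_take_findIdx_not, hq, Int.toNat_natCast]

-- ===== VERDICT (by name: the statement is the Claim_ definition above) =====
theorem exampleFour_spec : Claim_equal_exampleFour := by
  intro array num _ _
  unfold Spec_exampleFour exampleFour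
  rw [exampleFour_alt_eq]
  simpa using exampleFourLoop_eq num array []
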